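-- pv_equiv track=rewrite | github.com/frobinson47/solo-dev-suite | skills/design-loop/scripts/discover.py | detect_style_system
-- ===== SOURCE A (Python) =====
-- def detect_style_system(artifacts, ui_framework):
--     """Derive a concise style-system string from detected artifacts and frameworks."""
--     style_files = artifacts.get("style_files", [])
--     parts = []
--     if "tailwind" in ui_framework:
--         parts.append("Tailwind")
--     if "shadcn" in ui_framework:
--         parts.append("shadcn/ui")
--     if "styled-components" in ui_framework:
--         parts.append("styled-components")
--     if "emotion" in ui_framework:
--         parts.append("Emotion")
--     if "chakra" in ui_framework:
--         parts.append("Chakra")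
--     if "mui" in ui_framework:
--         parts.append("MUI")
--     if "mantine" in ui_framework:
--         parts.append("Mantine")
--     if "radix" in ui_framework:
--         parts.append("Radix primitives")
--     if "streamlit" in ui_framework:
--         parts.append("Streamlit default theme")
--     if "gradio" in ui_framework:
--         parts.append("Gradio default theme")
--     if any("tokens" in f.lower() for f in style_files):
--         parts.append("custom design tokens")
--     if any("theme" in f.lower() for f in style_files):
--         parts.append("theme file")
--     if not parts:
--         if style_files:
--             parts.append("plain CSS")
--         else:
--             parts.append("undetected — inspect before proposing")
--     return ", ".join(parts)
-- ===== SOURCE B (Python) =====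
-- _DETECTORS = [
--     ("framework", "tailwind", "Tailwind"),
--     ("framework", "shadcn", "shadcn/ui"),
--     ("framework", "styled-components", "styled-components"),
--     ("framework", "emotion", "Emotion"),
--     ("framework", "chakra", "Chakra"),
--     ("framework", "mui", "MUI"),
--     ("framework", "mantine", "Mantine"),
--     ("framework", "radix", "Radix primitives"),
--     ("framework", "streamlit", "Streamlit default theme"),
--     ("framework", "gradio", "Gradio default theme"),
--     ("file", "tokens", "custom design tokens"),
--     ("file", "theme", "theme file"),
-- ]
--
--
-- def detect_style_system(artifacts, ui_framework):
--     """Derive a concise style-system string from detected artifacts and frameworks."""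
--     style_files = artifacts.get("style_files", [])
--
--     def fires(kind, key):
--         if kind == "framework":
--             return key in ui_framework
--         return any(key in f.lower() for f in style_files)
--
--     def render(detectors):
--         # Recursively render the detector tail, then prepend this label (with a
--         # separator only when the tail is non-empty) -- no parts list, no join.
--         if not detectors:
--             return ""
--         kind, key, label = detectors[0]
--         tail = render(detectors[1:])
--         if not fires(kind, key):
--             return tail
--         return label if not tail else label + ", " + tail
--
--     rendered = render(_DETECTORS)
--     if rendered:
--         return rendered
--     return "plain CSS" if style_files else "undetected — inspect before proposing"
-- ===== Notes on version B (the rewrite author's own statement) =====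
-- stated objective: alternative
-- what changed: Replaces the mutable parts-list + ', '.join construction with a recursive renderer over a unified detector table that builds the result string directly back-to-front, inserting the separator only when the already-rendered tail is non-empty and choosing the fallback from the emptiness of the rendered string.
import Mathlib
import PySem

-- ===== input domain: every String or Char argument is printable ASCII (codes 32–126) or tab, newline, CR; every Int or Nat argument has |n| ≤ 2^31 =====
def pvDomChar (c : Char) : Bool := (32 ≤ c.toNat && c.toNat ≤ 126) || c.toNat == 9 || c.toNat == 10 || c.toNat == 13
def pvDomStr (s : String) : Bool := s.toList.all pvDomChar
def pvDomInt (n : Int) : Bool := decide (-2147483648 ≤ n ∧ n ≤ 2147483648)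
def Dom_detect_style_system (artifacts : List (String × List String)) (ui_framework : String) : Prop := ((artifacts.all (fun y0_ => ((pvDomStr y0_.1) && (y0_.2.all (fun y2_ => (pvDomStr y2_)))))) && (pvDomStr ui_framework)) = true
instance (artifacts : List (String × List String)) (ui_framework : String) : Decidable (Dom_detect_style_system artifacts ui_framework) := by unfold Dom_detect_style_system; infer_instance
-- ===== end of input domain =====

-- B replaces the parts-list + join construction with a recursive renderer over a unified
-- detector table that builds the result string directly back-to-front (alternative decomposition).


-- ===== PORT A =====
def detect_style_system (artifacts : List (String × List String)) (ui_framework : String) : String :=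
  let style_files := (PySem.Dict.mk artifacts).getD "style_files" []
  let parts : List String := []
  let parts := if PySem.Str.isIn "tailwind" ui_framework then parts ++ ["Tailwind"] else parts
  let parts := if PySem.Str.isIn "shadcn" ui_framework then parts ++ ["shadcn/ui"] else parts
  let parts := if PySem.Str.isIn "styled-components" ui_framework then parts ++ ["styled-components"] else parts
  let parts := if PySem.Str.isIn "emotion" ui_framework then parts ++ ["Emotion"] else parts
  let parts := if PySem.Str.isIn "chakra" ui_framework then parts ++ ["Chakra"] else parts
  let parts := if PySem.Str.isIn "mui" ui_framework then parts ++ ["MUI"] else parts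
  let parts := if PySem.Str.isIn "mantine" ui_framework then parts ++ ["Mantine"] else parts
  let parts := if PySem.Str.isIn "radix" ui_framework then parts ++ ["Radix primitives"] else parts
  let parts := if PySem.Str.isIn "streamlit" ui_framework then parts ++ ["Streamlit default theme"] else parts
  let parts := if PySem.Str.isIn "gradio" ui_framework then parts ++ ["Gradio default theme"] else parts
  let parts := if style_files.any (fun f => PySem.Str.isIn "tokens" (PySem.Str.lower f)) then parts ++ ["custom design tokens"] else parts
  let parts := if style_files.any (fun f => PySem.Str.isIn "theme" (PySem.Str.lower f)) then parts ++ ["theme file"] else parts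
  let parts := if parts.isEmpty then
      (if style_files.isEmpty then parts ++ ["undetected — inspect before proposing"] else parts ++ ["plain CSS"])
    else parts
  PySem.Str.join ", " parts

-- ===== PORT B =====
-- detector table: (kind, key, label); kind true = "framework" (search ui_framework), false = "file"
def pvDetectors : List (Bool × String × String) :=
  [(true, "tailwind", "Tailwind"), (true, "shadcn", "shadcn/ui"),
   (true, "styled-components", "styled-components"), (true, "emotion", "Emotion"),
   (true, "chakra", "Chakra"), (true, "mui", "MUI"), (true, "mantine", "Mantine"),
   (true, "radix", "Radix primitives"), (true, "streamlit", "Streamlit default theme"),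
   (true, "gradio", "Gradio default theme"),
   (false, "tokens", "custom design tokens"), (false, "theme", "theme file")]

def pvFires (style_files : List String) (ui_framework : String) (kind : Bool) (key : String) : Bool :=
  if kind then PySem.Str.isIn key ui_framework
  else style_files.any (fun f => PySem.Str.isIn key (PySem.Str.lower f))

def pvRender (style_files : List String) (ui_framework : String) : List (Bool × String × String) → String
  | [] => ""
  | (kind, key, label) :: rest =>
      let tail := pvRender style_files ui_framework rest
      if pvFires style_files ui_framework kind key then
        (if tail = "" then label else label ++ ", " ++ tail)
      else tail

def detect_style_system_alt (artifacts : List (String × List String)) (ui_framework : String) : String :=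
  let style_files := (PySem.Dict.mk artifacts).getD "style_files" []
  let rendered := pvRender style_files ui_framework pvDetectors
  if rendered ≠ "" then rendered
  else if style_files.isEmpty then "undetected — inspect before proposing" else "plain CSS"

-- ===== PRECONDITION & SPEC =====
def Spec_detect_style_system (artifacts : List (String × List String)) (ui_framework : String) (out : String) : Prop := out = detect_style_system_alt artifacts ui_framework
instance (artifacts : List (String × List String)) (ui_framework : String) (out : String) : Decidable (Spec_detect_style_system artifacts ui_framework out) := by unfold Spec_detect_style_system; infer_instance

-- ===== CLAIM =====
def Claim_equal_detect_style_system : Prop := ∀ (artifacts : List (String × List String)) (ui_framework : String), Dom_detect_style_system artifacts ui_framework → Spec_detect_style_system artifacts ui_framework (detect_style_system artifacts ui_framework)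

-- ===== LEMMAS AND PROOFS =====

lemma pv_join_nil : PySem.Str.join ", " [] = "" := by decide

lemma pv_join_singleton (x : String) : PySem.Str.join ", " [x] = x := by
  simp [PySem.Str.join, PySem.Chars.join_singleton]

lemma pv_join_cons_cons (p q : String) (rest : List String) :
    PySem.Str.join ", " (p :: q :: rest) = p ++ ", " ++ PySem.Str.join ", " (q :: rest) := by
  simp [PySem.Str.join, PySem.Chars.join_cons_cons]
  have h : (',' :: ' ' :: PySem.Chars.join [',', ' '] (q.toList :: List.map String.toList rest))
      = ", ".toList ++ PySem.Chars.join [',', ' '] (q.toList :: List.map String.toList rest) := by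
    have h2 : ", ".toList = [',', ' '] := by decide
    rw [h2]; rfl
  rw [h, String.ofList_append, String.ofList_toList, String.append_assoc]

lemma pv_join_ne_empty (y : String) (t : List String) (hy : y.toList ≠ []) :
    PySem.Str.join ", " (y :: t) ≠ "" := by
  cases t with
  | nil =>
      rw [pv_join_singleton]
      intro h; exact hy (by rw [h]; rfl)
  | cons q rest =>
      rw [pv_join_cons_cons]
      intro h
      have := congrArg String.toList h
      simp at this

lemma pv_render_eq_join (sf : List String) (ui : String) :
    ∀ ds : List (Bool × String × String), (∀ d ∈ ds, (d.2.2).toList ≠ []) →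
      pvRender sf ui ds
        = PySem.Str.join ", " ((ds.filter (fun d => pvFires sf ui d.1 d.2.1)).map (fun d => d.2.2)) := by
  intro ds
  induction ds with
  | nil => intro _; simp [pvRender, pv_join_nil]
  | cons d rest ih =>
      intro h
      obtain ⟨kind, key, label⟩ := d
      have hrest := ih (fun x hx => h x (List.mem_cons_of_mem _ hx))
      by_cases hf : pvFires sf ui kind key
      · simp only [pvRender, hrest, List.filter_cons, hf, if_true, List.map_cons]
        rcases hL : (rest.filter (fun d => pvFires sf ui d.1 d.2.1)).map (fun d => d.2.2) with _ | ⟨y, t⟩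
        · rw [hL]
          simp [pv_join_nil, pv_join_singleton]
        · have hy : y.toList ≠ [] := by
            have hmm : y ∈ (rest.filter (fun d => pvFires sf ui d.1 d.2.1)).map (fun d => d.2.2) := by
              rw [hL]; exact List.mem_cons_self
            rcases List.mem_map.mp hmm with ⟨e, he, rfl⟩
            exact h e (List.mem_cons_of_mem _ (List.mem_filter.mp he).1)
          rw [hL, pv_join_cons_cons]
          simp [pv_join_ne_empty y t hy]
      · simp only [pvRender, hrest, List.filter_cons, hf]
        simp

lemma pv_ite_append {α : Type} (c : Prop) [Decidable c] (p : List α) (x : α) :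
    (if c then p ++ [x] else p) = p ++ (if c then [x] else []) := by
  split_ifs <;> simp

lemma pv_filter_cons_append {α : Type} (p : α → Bool) (a : α) (l : List α) :
    (a :: l).filter p = (if p a then [a] else []) ++ l.filter p := by
  by_cases h : p a <;> simp [h]

lemma pv_main (sf : List String) (P : List String) (h : ∀ x ∈ P, x.toList ≠ []) :
    PySem.Str.join ", " (if P.isEmpty then
        (if sf.isEmpty then P ++ ["undetected — inspect before proposing"] else P ++ ["plain CSS"])
      else P)
    = if PySem.Str.join ", " P ≠ "" then PySem.Str.join ", " P
      else if sf.isEmpty then "undetected — inspect before proposing" else "plain CSS" := by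
  cases P with
  | nil =>
      by_cases h2 : sf.isEmpty <;> simp [h2, pv_join_nil, pv_join_singleton]
  | cons y t =>
      have hne := pv_join_ne_empty y t (h y List.mem_cons_self)
      simp [hne]

-- ===== VERDICT =====
lemma pv_lists_eq (sf : List String) (ui : String) :
    (pvDetectors.filter (fun d => pvFires sf ui d.1 d.2.1)).map (fun d => d.2.2)
    = ((((((((((((([] : List String)
        ++ (if PySem.Str.isIn "tailwind" ui then ["Tailwind"] else []))
        ++ (if PySem.Str.isIn "shadcn" ui then ["shadcn/ui"] else []))
        ++ (if PySem.Str.isIn "styled-components" ui then ["styled-components"] else []))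
        ++ (if PySem.Str.isIn "emotion" ui then ["Emotion"] else []))
        ++ (if PySem.Str.isIn "chakra" ui then ["Chakra"] else []))
        ++ (if PySem.Str.isIn "mui" ui then ["MUI"] else []))
        ++ (if PySem.Str.isIn "mantine" ui then ["Mantine"] else []))
        ++ (if PySem.Str.isIn "radix" ui then ["Radix primitives"] else []))
        ++ (if PySem.Str.isIn "streamlit" ui then ["Streamlit default theme"] else []))
        ++ (if PySem.Str.isIn "gradio" ui then ["Gradio default theme"] else []))
        ++ (if sf.any (fun f => PySem.Str.isIn "tokens" (PySem.Str.lower f)) then ["custom design tokens"] else []))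
        ++ (if sf.any (fun f => PySem.Str.isIn "theme" (PySem.Str.lower f)) then ["theme file"] else [])) := by
  unfold pvDetectors
  simp only [pv_filter_cons_append, List.filter_nil, List.map_append, List.map_cons, List.map_nil,
    apply_ite (List.map (fun d : Bool × String × String => d.2.2)), pvFires,
    reduceIte, Bool.false_eq_true, if_false]
  simp only [List.append_assoc, List.nil_append, List.append_nil]

lemma pv_chain_ne (sf : List String) (ui : String) :
    ∀ x ∈ (pvDetectors.filter (fun d => pvFires sf ui d.1 d.2.1)).map (fun d => d.2.2),
      x.toList ≠ [] := by
  intro x hx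
  rcases List.mem_map.mp hx with ⟨d, hd, rfl⟩
  have hmem := (List.mem_filter.mp hd).1
  fin_cases hmem <;> decide

-- ===== VERDICT =====
set_option maxHeartbeats 1000000 in
theorem detect_style_system_spec : Claim_equal_detect_style_system := by
  intro artifacts ui_framework _
  unfold Spec_detect_style_system
  simp only [detect_style_system, detect_style_system_alt]
  rw [pv_render_eq_join _ _ pvDetectors (fun d hd => by fin_cases hd <;> decide)]
  rw [pv_lists_eq]
  simp only [pv_ite_append, List.nil_append]
  rw [pv_main _ _ (by
    have := pv_chain_ne ((PySem.Dict.mk artifacts).getD "style_files" []) ui_framework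
    rw [pv_lists_eq] at this
    simpa only [List.nil_append] using this)]
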